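-- pv_equiv track=rewrite | github.com/parasiitism/AlgoDaily | leetcode/2293-min-max-game/main.py | minMaxGame
-- ===== SOURCE A (Python) =====
-- from typing import List
--
-- def minMaxGame(nums: List[int]) -> int:
--     while len(nums) > 1:
--         n = len(nums)
--         arr = []
--         for i in range(0, n, 2):
--             if i//2 % 2 == 0:
--                 arr.append(min(nums[i], nums[i+1]))
--             else:
--                 arr.append(max(nums[i], nums[i+1]))
--         nums = arr
--     return nums[0]
-- ===== SOURCE B (Python) =====
-- def minMaxGame(nums):
--     # Depth-first tournament tree: node at depth d, position p combines its two
--     # children (positions 2p, 2p+1 one level down) with min if p is even, max if odd;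
--     # leaves (depth 0) are the input elements.  Root is position 0 at depth log2(n).
--     def go(d, p):
--         if d == 0:
--             return nums[p]
--         a = go(d - 1, 2 * p)
--         b = go(d - 1, 2 * p + 1)
--         return min(a, b) if p % 2 == 0 else max(a, b)
--     return go(len(nums).bit_length() - 1, 0)
-- ===== Notes on version B (the rewrite author's own statement) =====
-- stated objective: alternative
-- what changed: Replaced A's breadth-first level-by-level rebuilding of arrays with a depth-first tournament-tree recursion that evaluates the root directly, choosing min/max by the node position's parity; no intermediate arrays are built. Pre_ admits exactly the inputs on which A returns (lengths that are powers of two); on other lengths A raises IndexError.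
import Mathlib
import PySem

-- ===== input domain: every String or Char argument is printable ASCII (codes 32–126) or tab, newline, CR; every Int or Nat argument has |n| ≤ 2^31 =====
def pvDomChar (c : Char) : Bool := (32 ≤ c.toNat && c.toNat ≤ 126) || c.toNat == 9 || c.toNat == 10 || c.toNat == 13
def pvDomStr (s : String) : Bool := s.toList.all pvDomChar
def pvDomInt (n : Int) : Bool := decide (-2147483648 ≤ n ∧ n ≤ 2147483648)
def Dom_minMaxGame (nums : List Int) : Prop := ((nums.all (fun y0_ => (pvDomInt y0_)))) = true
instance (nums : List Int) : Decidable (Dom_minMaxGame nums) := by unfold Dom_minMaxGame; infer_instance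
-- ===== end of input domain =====

-- B replaces A's breadth-first level-array reduction by a depth-first tournament-tree
-- recursion (objective: alternative, same cost).

-- ===== PORT A =====
-- one pass of A's while-loop body: build arr from the pairs of nums
def minMaxStep (nums : List Int) : List Int :=
  (PySem.List.pyRange 0 (nums.length : Int) 2).foldl
    (fun arr i =>
      if PySem.Int.mod (PySem.Int.floordiv i 2) 2 == 0 then
        arr ++ [min (PySem.List.pyGetD nums i 0) (PySem.List.pyGetD nums (i + 1) 0)]
      else
        arr ++ [max (PySem.List.pyGetD nums i 0) (PySem.List.pyGetD nums (i + 1) 0)]) []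

-- A's while-loop; fuel = initial length bounds the iteration count (totality guard only)
def minMaxLoop : Nat → List Int → List Int
  | 0, nums => nums
  | fuel + 1, nums => if 1 < nums.length then minMaxLoop fuel (minMaxStep nums) else nums

def minMaxGame (nums : List Int) : Int :=
  PySem.List.pyGetD (minMaxLoop nums.length nums) 0 0

-- ===== PORT B =====
-- Source B's go(d, p): value of the tournament-tree node at depth d, position p
-- (p is a Nat: in Source B p starts at 0 and positions 2p, 2p+1 stay nonnegative)
def tourney (nums : List Int) : Nat → Nat → Int
  | 0, p => PySem.List.pyGetD nums (p : Int) 0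
  | d + 1, p =>
    let a := tourney nums d (2 * p)
    let b := tourney nums d (2 * p + 1)
    if p % 2 == 0 then min a b else max a b

-- len(nums).bit_length() - 1 as in Source B (Nat subtraction; inside Pre_ the length is ≥ 1)
def minMaxGame_alt (nums : List Int) : Int :=
  tourney nums (PySem.Int.bitLength (nums.length : Int) - 1) 0

-- ===== PRECONDITION & SPEC =====
-- A raises IndexError unless the length is a power of two (indexing past the end once a
-- level has odd length, or the first element of an empty input); Pre_ admits exactly the
-- inputs on which the Python A returns.
def Pre_minMaxGame (nums : List Int) : Prop :=
  nums.length = 2 ^ (PySem.Int.bitLength (nums.length : Int) - 1)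
instance (nums : List Int) : Decidable (Pre_minMaxGame nums) := by
  unfold Pre_minMaxGame; infer_instance

def pvWitness_minMaxGame : List Int := [3, 1, 5, 2]

def Spec_minMaxGame (nums : List Int) (out : Int) : Prop := out = minMaxGame_alt nums
instance (nums : List Int) (out : Int) : Decidable (Spec_minMaxGame nums out) := by
  unfold Spec_minMaxGame; infer_instance

-- ===== CLAIM (what is proved, stated in full; the proofs are below) =====
def Claim_equal_minMaxGame : Prop :=
  ∀ (nums : List Int), Dom_minMaxGame nums → Pre_minMaxGame nums →
    Spec_minMaxGame nums (minMaxGame nums)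

-- ===== LEMMAS AND PROOFS =====

-- the value A appends at slot j of one reduction level
def pairOp (nums : List Int) (j : Nat) : Int :=
  if j % 2 = 0 then min (nums.getD (2 * j) 0) (nums.getD (2 * j + 1) 0)
  else max (nums.getD (2 * j) 0) (nums.getD (2 * j + 1) 0)

theorem minMaxStep_eq_map (nums : List Int) :
    minMaxStep nums = (List.range ((nums.length + 1) / 2)).map (pairOp nums) := by
  unfold minMaxStep
  rw [PySem.List.pyRange_of_pos 0 (nums.length : Int) (by norm_num), List.foldl_map]
  have hrange : (if (0:Int) < (nums.length : Int) then
      (((nums.length : Int) - 0 + 2 - 1) / 2).toNat else 0) = (nums.length + 1) / 2 := by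
    rcases Nat.eq_zero_or_pos nums.length with h | h
    · simp [h]
    · rw [if_pos (by exact_mod_cast h)]
      have h1 : ((nums.length : Int) - 0 + 2 - 1) = ((nums.length + 1 : Nat) : Int) := by
        push_cast; ring
      rw [h1, show ((2:Int)) = ((2:Nat):Int) by norm_num, ← Int.natCast_div, Int.toNat_natCast]
  rw [hrange]
  have hfun : ∀ (arr : List Int) (k : Nat),
      (if PySem.Int.mod (PySem.Int.floordiv (0 + 2 * (k : Int)) 2) 2 == 0 then
        arr ++ [min (PySem.List.pyGetD nums (0 + 2 * (k : Int)) 0)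
                    (PySem.List.pyGetD nums (0 + 2 * (k : Int) + 1) 0)]
      else
        arr ++ [max (PySem.List.pyGetD nums (0 + 2 * (k : Int)) 0)
                    (PySem.List.pyGetD nums (0 + 2 * (k : Int) + 1) 0)]) =
      arr ++ [pairOp nums k] := by
    intro arr k
    have h2 : (0 + 2 * (k : Int)) = ((2 * k : Nat) : Int) := by push_cast; ring
    have h3 : ((2 * k : Nat) : Int) + 1 = ((2 * k + 1 : Nat) : Int) := by push_cast; ring
    have h4 : PySem.Int.floordiv ((2 * k : Nat) : Int) 2 = ((k : Nat) : Int) := by simp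
    have h5 : PySem.Int.mod ((k : Nat) : Int) 2 = ((k % 2 : Nat) : Int) := by simp
    rw [h2, h3, h4, h5]
    simp only [PySem.List.pyGetD_natCast, pairOp, beq_iff_eq, Nat.cast_eq_zero]
    split <;> rfl
  simp only [hfun]
  rw [PySem.List.foldl_append_singleton_eq_map]
  simp

theorem length_minMaxStep (nums : List Int) :
    (minMaxStep nums).length = (nums.length + 1) / 2 := by
  rw [minMaxStep_eq_map]; simp

theorem getD_minMaxStep (nums : List Int) (j : Nat) :
    (minMaxStep nums).getD j 0 = pairOp nums j := by
  rw [minMaxStep_eq_map]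
  rcases lt_or_ge j ((nums.length + 1) / 2) with h | h
  · exact PySem.List.getD_map_range (pairOp nums) _ j 0 h
  · have hlhs : ((List.range ((nums.length + 1) / 2)).map (pairOp nums)).getD j 0 = 0 := by
      apply List.getD_eq_default
      simpa using h
    have h1 : nums.getD (2 * j) 0 = 0 := List.getD_eq_default _ _ (by omega)
    have h2 : nums.getD (2 * j + 1) 0 = 0 := List.getD_eq_default _ _ (by omega)
    rw [hlhs, pairOp, h1, h2]
    split <;> simp

-- one breadth-first level of A equals one extra depth of B's tree
theorem tourney_step (nums : List Int) (d p : Nat) :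
    tourney (minMaxStep nums) d p = tourney nums (d + 1) p := by
  induction d generalizing p with
  | zero =>
    simp only [tourney, PySem.List.pyGetD_natCast]
    rw [getD_minMaxStep]
    simp only [pairOp, beq_iff_eq]
  | succ d ih =>
    simp only [tourney]
    rw [ih, ih]
    simp only [tourney]

theorem loop_id (fuel : Nat) (nums : List Int) (h : ¬ 1 < nums.length) :
    minMaxLoop fuel nums = nums := by
  cases fuel <;> simp [minMaxLoop, h]

theorem loop_tourney (d : Nat) :
    ∀ (fuel : Nat) (nums : List Int), d ≤ fuel → nums.length = 2 ^ d →
      PySem.List.pyGetD (minMaxLoop fuel nums) 0 0 = tourney nums d 0 := by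
  induction d with
  | zero =>
    intro fuel nums _ hlen
    rw [loop_id fuel nums (by simp at hlen; omega)]
    simp [tourney]
  | succ d ih =>
    intro fuel nums hf hlen
    cases fuel with
    | zero => omega
    | succ f =>
      have hgt : 1 < nums.length := by
        rw [hlen]; exact Nat.one_lt_two_pow (by omega)
      have hlen' : (minMaxStep nums).length = 2 ^ d := by
        rw [length_minMaxStep, hlen, pow_succ]; omega
      rw [minMaxLoop, if_pos hgt, ih f (minMaxStep nums) (by omega) hlen', tourney_step]

-- ===== VERDICT (by name: the statement is the Claim_ definition above) =====
theorem minMaxGame_spec : Claim_equal_minMaxGame := by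
  intro nums _ hpre
  unfold Spec_minMaxGame minMaxGame minMaxGame_alt
  exact loop_tourney _ nums.length nums (by
    calc PySem.Int.bitLength (nums.length : Int) - 1
        ≤ 2 ^ (PySem.Int.bitLength (nums.length : Int) - 1) := Nat.le_of_lt Nat.lt_two_pow_self
      _ = nums.length := hpre.symm) hpre
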